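-- pv_equiv track=rewrite | github.com/alexandevs2309/api_peluqueria | apps/settings_api/admin_views.py | _is_credentials_error
-- ===== SOURCE A (Python) =====
-- def _is_credentials_error(error_message):
--     lowered = str(error_message).lower()
--     return any(fragment in lowered for fragment in [
--         'invalid',
--         'authentication',
--         'unauthorized',
--         'permission',
--         'api key',
--         'signature',
--         'forbidden',
--         'token'
--     ])
-- ===== SOURCE B (Python) =====
-- _FRAGMENTS = [
--     'invalid',
--     'authentication',
--     'unauthorized',
--     'permission',
--     'api key',
--     'signature',
--     'forbidden',
--     'token',
-- ]
--
--
-- def _is_credentials_error(error_message):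
--     # Single left-to-right scan: at each position, test whether any
--     # fragment starts there, instead of one full substring scan per fragment.
--     lowered = str(error_message).lower()
--     for i in range(len(lowered)):
--         for frag in _FRAGMENTS:
--             if lowered.startswith(frag, i):
--                 return True
--     return False
-- ===== Notes on version B (the rewrite author's own statement) =====
-- stated objective: alternative
-- what changed: Replaces per-fragment full substring scans (any(frag in lowered)) with a single left-to-right scan over positions that tests each fragment with startswith at the current position, i.e. the loop nesting is inverted: positions outside, fragments inside.
import Mathlib
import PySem

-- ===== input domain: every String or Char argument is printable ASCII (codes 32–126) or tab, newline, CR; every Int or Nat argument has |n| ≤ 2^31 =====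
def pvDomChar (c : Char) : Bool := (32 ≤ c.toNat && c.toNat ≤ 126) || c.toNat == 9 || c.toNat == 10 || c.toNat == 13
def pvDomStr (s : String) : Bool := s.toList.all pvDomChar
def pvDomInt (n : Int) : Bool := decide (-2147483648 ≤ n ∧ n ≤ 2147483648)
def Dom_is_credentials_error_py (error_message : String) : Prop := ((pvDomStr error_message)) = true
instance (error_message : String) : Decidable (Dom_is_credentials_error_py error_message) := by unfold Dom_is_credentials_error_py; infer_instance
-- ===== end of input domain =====

-- ===== PORT A =====
-- B inverts A's loop nesting: one scan over positions with startswith tests, instead of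
-- one full substring scan per fragment ("alternative"; same asymptotic cost).
def is_credentials_error_py (error_message : String) : Bool :=
  let lowered := PySem.Str.lower error_message
  ["invalid", "authentication", "unauthorized", "permission",
   "api key", "signature", "forbidden", "token"].any
    (fun fragment => PySem.Str.isIn fragment lowered)

-- ===== PORT B =====
def pvFragments : List (List Char) :=
  ["invalid", "authentication", "unauthorized", "permission",
   "api key", "signature", "forbidden", "token"].map String.toList

def is_credentials_error_py_alt (error_message : String) : Bool :=
  let lowered := (PySem.Str.lower error_message).toList
  -- lowered.startswith(frag, i) with 0 ≤ i ≤ len is exactly startswith on lowered[i:]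
  (List.range lowered.length).any
    (fun i => pvFragments.any (fun frag => PySem.Chars.startswith (lowered.drop i) frag))

-- ===== PRECONDITION & SPEC =====
def Spec_is_credentials_error_py (error_message : String) (out : Bool) : Prop := out = is_credentials_error_py_alt error_message
instance (error_message : String) (out : Bool) : Decidable (Spec_is_credentials_error_py error_message out) := by unfold Spec_is_credentials_error_py; infer_instance

-- ===== CLAIM (what is proved, stated in full; the proofs are below) =====
def Claim_equal_is_credentials_error_py : Prop := ∀ (error_message : String), Dom_is_credentials_error_py error_message → Spec_is_credentials_error_py error_message (is_credentials_error_py error_message)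

-- ===== LEMMAS AND PROOFS =====

lemma scan_eq_isIn (l frag : List Char) (h : frag ≠ []) :
    ((List.range l.length).any fun i => PySem.Chars.startswith (l.drop i) frag)
      = PySem.Chars.isIn frag l := by
  rw [Bool.eq_iff_iff]
  simp only [List.any_eq_true, List.mem_range, PySem.Chars.startswith_iff]
  rw [← PySem.Chars.exists_prefix_drop_iff_isIn]
  constructor
  · rintro ⟨i, _, hp⟩; exact ⟨i, hp⟩
  · rintro ⟨j, hp⟩
    by_cases hj : j < l.length
    · exact ⟨j, hj, hp⟩
    · exfalso
      rw [List.drop_eq_nil_of_le (le_of_not_gt hj)] at hp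
      exact h (List.prefix_nil.mp hp)

lemma any_swap {α β : Type} (xs : List α) (ys : List β) (p : α → β → Bool) :
    xs.any (fun x => ys.any (fun y => p x y)) = ys.any (fun y => xs.any (fun x => p x y)) := by
  rw [Bool.eq_iff_iff]
  simp only [List.any_eq_true]
  tauto

-- ===== VERDICT (by name: the statement is the Claim_ definition above) =====
theorem is_credentials_error_py_spec : Claim_equal_is_credentials_error_py := by
  intro em _
  unfold Spec_is_credentials_error_py is_credentials_error_py is_credentials_error_py_alt pvFragments
  rw [any_swap]
  simp only [List.map, List.any_cons, List.any_nil, PySem.Str.isIn_eq]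
  rw [scan_eq_isIn _ _ (by decide), scan_eq_isIn _ _ (by decide), scan_eq_isIn _ _ (by decide),
    scan_eq_isIn _ _ (by decide), scan_eq_isIn _ _ (by decide), scan_eq_isIn _ _ (by decide),
    scan_eq_isIn _ _ (by decide), scan_eq_isIn _ _ (by decide)]
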